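-- pv_equiv track=rewrite | github.com/Egornn/Python-gb | Lectures/lecture1/Homework/Homework4/4.py | all_prime_dividers
-- ===== SOURCE A (Python) =====
-- def all_prime_dividers(number):
--     all_numbers = [i for i in range(2, number // 2 + 1)]
--     all_numbers.append(number)
--     is_prime = [True for x in range(len(all_numbers))]
--     for i in range(len(all_numbers)):
--         if is_prime[i]:
--             for j in range(i + 1, len(all_numbers)):
--                 if is_prime[j]:
--                     is_prime[j] = all_numbers[j] % all_numbers[i] > 0
--     return [all_numbers[i] * is_prime[i] for i in range(len(is_prime)) if is_prime[i]]
-- ===== SOURCE B (Python) =====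
-- def all_prime_dividers(number):
--     limit = number // 2
--     primes = []
--     if limit >= 2:
--         flags = [True] * (limit + 1)
--         flags[0] = flags[1] = False
--         for p in range(2, limit + 1):
--             if flags[p]:
--                 for m in range(p + p, limit + 1, p):
--                     flags[m] = False
--         primes = [k for k in range(2, limit + 1) if flags[k]]
--     if all(number % p != 0 for p in primes):
--         primes.append(number)
--     return primes
-- ===== Notes on version B (the rewrite author's own statement) =====
-- stated objective: faster
-- what changed: Replaced the O(n^2) trial-division sieve over the list [2..n//2]+[n] by a Sieve of Eratosthenes boolean array over [0..n//2] followed by a single divisibility check that appends n when no sieved prime divides it.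
import Mathlib
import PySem

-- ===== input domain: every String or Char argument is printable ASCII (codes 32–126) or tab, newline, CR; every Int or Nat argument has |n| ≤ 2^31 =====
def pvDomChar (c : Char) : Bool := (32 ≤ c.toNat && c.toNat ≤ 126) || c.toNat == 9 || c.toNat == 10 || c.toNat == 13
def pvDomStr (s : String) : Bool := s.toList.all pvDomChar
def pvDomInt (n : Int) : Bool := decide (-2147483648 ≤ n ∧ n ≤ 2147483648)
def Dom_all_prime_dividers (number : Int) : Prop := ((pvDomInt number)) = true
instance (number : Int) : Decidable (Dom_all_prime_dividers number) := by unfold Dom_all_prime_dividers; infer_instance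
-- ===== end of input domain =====

-- B replaces A's O(n^2) trial-division sieve over [2..n//2]+[n] by a Sieve-of-Eratosthenes
-- boolean array over [0..n//2] plus one divisibility pass that appends n if no sieved prime divides it (objective: faster).


-- ===== PORT A =====
-- literal transliteration of A: build [2..n//2]+[n], sieve by trial division of later entries
-- by still-prime earlier entries, return the surviving entries (value * bool-as-int).
def all_prime_dividers (number : Int) : List Int :=
  let all_numbers : List Int :=
    PySem.List.pyRange 2 (PySem.Int.floordiv number 2 + 1) 1 ++ [number]
  let is_prime0 : List Bool :=
    (PySem.List.pyRange 0 (all_numbers.length : Int) 1).map (fun _ => true)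
  let is_prime :=
    (PySem.List.pyRange 0 (all_numbers.length : Int) 1).foldl (fun ip i =>
      if PySem.List.pyGetD ip i false then
        (PySem.List.pyRange (i + 1) (all_numbers.length : Int) 1).foldl (fun ip2 j =>
          if PySem.List.pyGetD ip2 j false then
            PySem.List.pySetD ip2 j
              (decide (0 < PySem.Int.mod (PySem.List.pyGetD all_numbers j 0)
                                         (PySem.List.pyGetD all_numbers i 0)))
          else ip2) ip
      else ip) is_prime0
  ((PySem.List.pyRange 0 (is_prime.length : Int) 1).filter
      (fun i => PySem.List.pyGetD is_prime i false)).map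
    (fun i => PySem.List.pyGetD all_numbers i 0 *
              (if PySem.List.pyGetD is_prime i false then 1 else 0))

-- ===== PORT B =====
-- literal transliteration of B (Source B): Eratosthenes flags over [0..n//2], collect primes,
-- append number when no prime divides it.
def all_prime_dividers_alt (number : Int) : List Int :=
  let limit := PySem.Int.floordiv number 2
  let primes : List Int :=
    if 2 ≤ limit then
      let flags0 : List Bool := (PySem.List.pyRange 0 (limit + 1) 1).map (fun _ => true)
      let flags1 := PySem.List.pySetD (PySem.List.pySetD flags0 0 false) 1 false
      let flags :=
        (PySem.List.pyRange 2 (limit + 1) 1).foldl (fun fl p =>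
          if PySem.List.pyGetD fl p false then
            (PySem.List.pyRange (p + p) (limit + 1) p).foldl
              (fun fl2 m => PySem.List.pySetD fl2 m false) fl
          else fl) flags1
      (PySem.List.pyRange 2 (limit + 1) 1).filter (fun k => PySem.List.pyGetD flags k false)
    else []
  if primes.all (fun p => decide (PySem.Int.mod number p ≠ 0)) then primes ++ [number]
  else primes

-- ===== PRECONDITION & SPEC =====
def Spec_all_prime_dividers (number : Int) (out : List Int) : Prop := out = all_prime_dividers_alt number
instance (number : Int) (out : List Int) : Decidable (Spec_all_prime_dividers number out) := by unfold Spec_all_prime_dividers; infer_instance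

-- ===== CLAIM (what is proved, stated in full; the proofs are below) =====
def Claim_equal_all_prime_dividers : Prop := ∀ (number : Int), Dom_all_prime_dividers number → Spec_all_prime_dividers number (all_prime_dividers number)

-- ===== LEMMAS AND PROOFS =====

-- Boolean extensionality helper.
theorem pv_bool_ext {a b : Bool} (h : a = true ↔ b = true) : a = b := by
  cases a <;> cases b <;> simp_all

-- A's survival predicate on positions: position j survives iff no earlier surviving
-- position's value divides (leaves a positive remainder on) its value.
def prA (v : Nat → Int) (j : Nat) : Bool :=
  (List.range j).attach.all
    (fun i => !(prA v i.1) || decide (0 < PySem.Int.mod (v j) (v i.1)))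
termination_by j
decreasing_by exact List.mem_range.mp i.2

theorem prA_iff (v : Nat → Int) (j : Nat) :
    prA v j = true ↔ ∀ i, i < j → prA v i = true → 0 < PySem.Int.mod (v j) (v i) := by
  rw [prA]
  simp [List.all_eq_true, List.mem_range]
  constructor
  · intro h i hi hp
    rcases h i hi with h' | h'
    · rw [hp] at h'; cases h'
    · exact h'
  · intro h a ha
    by_cases hp : prA v a = true
    · exact Or.inr (h a ha hp)
    · exact Or.inl (by simpa using hp)

-- B's survival predicate on values: k ≥ 2 survives iff no surviving proper divisor marks it.
def prB (k : Nat) : Bool :=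
  decide (2 ≤ k) &&
    (List.range k).attach.all
      (fun p => !(prB p.1 && decide (p.1 ∣ k ∧ 2 * p.1 ≤ k)))
termination_by k
decreasing_by exact List.mem_range.mp p.2

theorem prB_iff (k : Nat) :
    prB k = true ↔ 2 ≤ k ∧ ∀ p, p < k → ¬(prB p = true ∧ p ∣ k ∧ 2 * p ≤ k) := by
  rw [prB]
  simp [List.all_eq_true, List.mem_range]
  intro _
  constructor
  · intro h p hp hbp hdvd
    rcases h p hp with h' | h' | h'
    · rw [hbp] at h'; cases h'
    · exact absurd hdvd h'
    · exact h'
  · intro h a ha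
    by_cases hb : prB a = true
    · by_cases hd : a ∣ k
      · exact Or.inr (Or.inr (h a ha hb hd))
      · exact Or.inr (Or.inl hd)
    · exact Or.inl (by simpa using hb)

theorem prB_of_lt_two {p : Nat} (h : p < 2) : prB p = false := by
  cases hp : prB p
  · rfl
  · exact absurd ((prB_iff p).mp hp).1 (by omega)

theorem prB_zero : prB 0 = false := prB_of_lt_two (by omega)
theorem prB_one : prB 1 = false := prB_of_lt_two (by omega)

theorem two_mul_le_of_dvd {d m : Nat} (hd : d ∣ m) (hlt : d < m) : 2 * d ≤ m := by
  obtain ⟨q, rfl⟩ := hd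
  rcases q with _ | _ | q
  · omega
  · omega
  · nlinarith

-- pointwise effect of one guarded set step
theorem pv_getD_step_set (s : List Bool) (j : Nat) (c : Bool) (x : Nat) :
    (if s.getD j false then s.set j c else s).getD x false
      = if x = j then s.getD j false && c else s.getD x false := by
  by_cases hx : x = j
  · subst hx
    by_cases hlen : x < s.length
    · have hx' : s.getD x false = s[x] := by
        simp [List.getD_eq_getElem?_getD, List.getElem?_eq_getElem hlen]
      cases hj : s.getD x false <;>
        simp [hj, hx'.symm.trans hj, List.getD_eq_getElem?_getD, List.getElem?_set, hlen]
    · have h0 : s[x]? = none := List.getElem?_eq_none (by omega : s.length ≤ x)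
      have h1 : (s.set x c)[x]? = none := by
        rw [List.getElem?_eq_none] <;> simp <;> omega
      simp [List.getD_eq_getElem?_getD, h0, h1]
  · cases hj : s.getD j false <;>
      simp [hx, List.getD_eq_getElem?_getD, List.getElem?_set, Ne.symm hx]

theorem pv_getD_set_false (s : List Bool) (k x : Nat) :
    (s.set k false).getD x false = if x = k then false else s.getD x false := by
  by_cases hx : x = k
  · subst hx
    by_cases hlen : x < s.length
    · simp [List.getD_eq_getElem?_getD, List.getElem?_set, hlen]
    · simp [List.getD_eq_getElem?_getD, List.getElem?_set,
        List.getElem?_eq_none (by omega : s.length ≤ x), hlen]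
  · simp [hx, Ne.symm hx, List.getD_eq_getElem?_getD, List.getElem?_set]

-- generic characterisation of A's inner loop (guarded conditional set at int indices)
theorem pv_foldA_inner (c : Int → Bool) :
    ∀ (js : List Int) (s : List Bool), (∀ m ∈ js, 0 ≤ m) →
      ((js.foldl (fun s' j => if PySem.List.pyGetD s' j false then
          PySem.List.pySetD s' j (c j) else s') s).length = s.length ∧
       ∀ x : Nat, (js.foldl (fun s' j => if PySem.List.pyGetD s' j false then
          PySem.List.pySetD s' j (c j) else s') s).getD x false
         = if ((x : Int) ∈ js) then s.getD x false && c x else s.getD x false) := by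
  intro js
  induction js with
  | nil => exact fun s _ => ⟨rfl, fun x => by simp⟩
  | cons m rest ih =>
    intro s h
    have hm : 0 ≤ m := h m List.mem_cons_self
    have hmk : m = ((m.toNat : Nat) : Int) := (Int.toNat_of_nonneg hm).symm
    simp only [List.foldl_cons]
    rw [hmk, PySem.List.pyGetD_natCast, PySem.List.pySetD_natCast]
    set k := m.toNat with hk
    set s' := if s.getD k false then s.set k (c ((k : Nat) : Int)) else s with hs'
    obtain ⟨ihlen, ihpt⟩ := ih s' (fun m' hm' => h m' (List.mem_cons_of_mem _ hm'))
    refine ⟨?_, ?_⟩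
    · rw [ihlen, hs']
      split <;> simp
    · intro x
      rw [ihpt x]
      have hpt : s'.getD x false
          = if x = k then s.getD k false && c ((k : Nat) : Int) else s.getD x false :=
        pv_getD_step_set s k _ x
      rw [hpt]
      by_cases hxm : x = k
      · have hxm2 : ((x : Int)) = ((k : Nat) : Int) := by exact_mod_cast hxm
        have hmem : ((x : Int)) ∈ ((k : Nat) : Int) :: rest := by
          rw [hxm2]; exact List.mem_cons_self
        rw [if_pos hxm, if_pos hmem, hxm]
        split
        · cases s.getD k false <;> cases c ((k : Nat) : Int) <;> rfl
        · rfl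
      · have hxm' : ((x : Int)) ≠ ((k : Nat) : Int) := fun hc => hxm (by exact_mod_cast hc)
        rw [if_neg hxm]
        by_cases hxr : ((x : Int)) ∈ rest
        · rw [if_pos hxr, if_pos (List.mem_cons_of_mem _ hxr)]
        · rw [if_neg hxr, if_neg (by simp [hxm', hxr])]

-- generic characterisation of B's inner loop (unconditional clearing at int indices)
theorem pv_foldB_inner :
    ∀ (ms : List Int) (s : List Bool), (∀ m ∈ ms, 0 ≤ m) →
      ((ms.foldl (fun s' m => PySem.List.pySetD s' m false) s).length = s.length ∧
       ∀ x : Nat, (ms.foldl (fun s' m => PySem.List.pySetD s' m false) s).getD x false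
         = if ((x : Int) ∈ ms) then false else s.getD x false) := by
  intro ms
  induction ms with
  | nil => exact fun s _ => ⟨rfl, fun x => by simp⟩
  | cons m rest ih =>
    intro s h
    have hm : 0 ≤ m := h m List.mem_cons_self
    have hmk : m = ((m.toNat : Nat) : Int) := (Int.toNat_of_nonneg hm).symm
    simp only [List.foldl_cons]
    rw [hmk, PySem.List.pySetD_natCast]
    set k := m.toNat with hk
    obtain ⟨ihlen, ihpt⟩ :=
      ih (s.set k false) (fun m' hm' => h m' (List.mem_cons_of_mem _ hm'))
    refine ⟨by rw [ihlen]; simp, ?_⟩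
    intro x
    rw [ihpt x, pv_getD_set_false]
    by_cases hxm : x = k
    · have hxm2 : ((x : Int)) = ((k : Nat) : Int) := by exact_mod_cast hxm
      have hmem : ((x : Int)) ∈ ((k : Nat) : Int) :: rest := by
        rw [hxm2]; exact List.mem_cons_self
      rw [if_pos hxm, if_pos hmem]
      split <;> rfl
    · have hxm' : ((x : Int)) ≠ ((k : Nat) : Int) := fun hc => hxm (by exact_mod_cast hc)
      rw [if_neg hxm]
      by_cases hxr : ((x : Int)) ∈ rest
      · rw [if_pos hxr, if_pos (List.mem_cons_of_mem _ hxr)]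
      · rw [if_neg hxr, if_neg (by simp [hxm', hxr])]

-- named pieces of port A (definitionally equal to the port's loops)
def aVals (number : Int) : List Int :=
  PySem.List.pyRange 2 (PySem.Int.floordiv number 2 + 1) 1 ++ [number]

def aStep (vals : List Int) (ip : List Bool) (i : Int) : List Bool :=
  if PySem.List.pyGetD ip i false then
    (PySem.List.pyRange (i + 1) (vals.length : Int) 1).foldl (fun ip2 j =>
      if PySem.List.pyGetD ip2 j false then
        PySem.List.pySetD ip2 j
          (decide (0 < PySem.Int.mod (PySem.List.pyGetD vals j 0)
                                     (PySem.List.pyGetD vals i 0)))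
      else ip2) ip
  else ip

def aSieve (vals : List Int) (t : Int) : List Bool :=
  (PySem.List.pyRange 0 t 1).foldl (aStep vals)
    ((PySem.List.pyRange 0 (vals.length : Int) 1).map (fun _ => true))

theorem A_eq (number : Int) :
    all_prime_dividers number =
      ((PySem.List.pyRange 0 ((aSieve (aVals number) ((aVals number).length : Int)).length : Int) 1).filter
          (fun i => PySem.List.pyGetD (aSieve (aVals number) ((aVals number).length : Int)) i false)).map
        (fun i => PySem.List.pyGetD (aVals number) i 0 *
          (if PySem.List.pyGetD (aSieve (aVals number) ((aVals number).length : Int)) i false then 1 else 0)) := rfl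

-- partial-progress predicate for A's outer loop
def partA (v : Nat → Int) (j t : Nat) : Bool :=
  (List.range (min t j)).all
    (fun i => !(prA v i) || decide (0 < PySem.Int.mod (v j) (v i)))

theorem partA_ge (v : Nat → Int) {j t : Nat} (h : j ≤ t) : partA v j t = prA v j := by
  rw [partA, Nat.min_eq_right h]
  apply pv_bool_ext
  rw [prA_iff]
  simp only [List.all_eq_true, List.mem_range, Bool.or_eq_true, Bool.not_eq_true',
    decide_eq_true_eq]
  constructor
  · intro hh i hi hp
    rcases hh i hi with h' | h'
    · rw [hp] at h'; cases h'
    · exact h'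
  · intro hh i hi
    by_cases hp : prA v i = true
    · exact Or.inr (hh i hi hp)
    · exact Or.inl (by simpa using hp)

theorem partA_succ (v : Nat → Int) (j t : Nat) :
    partA v j (t + 1) = (partA v j t &&
      (if t < j then (!(prA v t) || decide (0 < PySem.Int.mod (v j) (v t))) else true)) := by
  rcases Nat.lt_or_ge t j with hlt | hge
  · rw [partA, partA, Nat.min_eq_left (by omega : t + 1 ≤ j), Nat.min_eq_left (by omega : t ≤ j),
      List.range_succ, List.all_append, if_pos hlt, List.all_cons, List.all_nil, Bool.and_true]
  · rw [partA, partA, Nat.min_eq_right (by omega : j ≤ t + 1), Nat.min_eq_right hge,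
      if_neg (by omega), Bool.and_true]

theorem aSieve_char (vals : List Int) :
    ∀ t : Nat, t ≤ vals.length →
      (aSieve vals (t : Int)).length = vals.length ∧
      ∀ j, j < vals.length →
        (aSieve vals (t : Int)).getD j false = partA (fun i => vals.getD i 0) j t := by
  intro t
  induction t with
  | zero =>
    intro _
    unfold aSieve
    rw [show ((0 : Nat) : Int) = 0 from rfl, PySem.List.pyRange_one_eq_nil le_rfl]
    simp only [List.foldl_nil]
    constructor
    · rw [List.length_map, PySem.List.length_pyRange_one]; omega
    · intro j hj
      have hjl : j < ((PySem.List.pyRange 0 ((vals.length : Nat) : Int) 1).map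
          (fun _ => true)).length := by
        rw [List.length_map, PySem.List.length_pyRange_one]; omega
      rw [List.getD_eq_getElem?_getD, List.getElem?_eq_getElem hjl]
      simp [partA]
  | succ t iht =>
    intro ht
    obtain ⟨ihlen, ihpt⟩ := iht (by omega)
    have hstep : aSieve vals (((t + 1 : Nat)) : Int)
        = aStep vals (aSieve vals (t : Int)) (t : Int) := by
      unfold aSieve
      rw [show (((t + 1 : Nat)) : Int) = (t : Int) + 1 by push_cast; ring,
        PySem.List.pyRange_one_succ_right (Int.natCast_nonneg t),
        List.foldl_append, List.foldl_cons, List.foldl_nil]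
    have hread : PySem.List.pyGetD (aSieve vals (t : Int)) (t : Int) false
        = prA (fun i => vals.getD i 0) t := by
      rw [PySem.List.pyGetD_natCast, ihpt t (by omega), partA_ge _ le_rfl]
    rw [hstep]
    unfold aStep
    rw [hread]
    by_cases hp : prA (fun i => vals.getD i 0) t = true
    · rw [if_pos hp]
      have hnn : ∀ m ∈ PySem.List.pyRange ((t : Int) + 1) ((vals.length : Int)) 1, 0 ≤ m := by
        intro m hm
        have := PySem.List.mem_pyRange_one.mp hm
        omega
      obtain ⟨flen, fpt⟩ := pv_foldA_inner
        (fun jj => decide (0 < PySem.Int.mod (PySem.List.pyGetD vals jj 0)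
                                             (PySem.List.pyGetD vals (t : Int) 0)))
        _ (aSieve vals (t : Int)) hnn
      refine ⟨by rw [flen, ihlen], ?_⟩
      intro j hj
      rw [fpt j, partA_succ]
      by_cases hjt : t < j
      · have hmem : ((j : Int)) ∈ PySem.List.pyRange ((t : Int) + 1) ((vals.length : Int)) 1 := by
          rw [PySem.List.mem_pyRange_one]
          constructor
          · exact_mod_cast hjt
          · exact_mod_cast hj
        rw [if_pos hmem, if_pos hjt, ihpt j hj, hp]
        simp [PySem.List.pyGetD_natCast]
      · have hmem : ¬ ((j : Int)) ∈ PySem.List.pyRange ((t : Int) + 1) ((vals.length : Int)) 1 := by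
          rw [PySem.List.mem_pyRange_one]
          omega
        rw [if_neg hmem, if_neg hjt, ihpt j hj, Bool.and_true]
    · rw [if_neg hp]
      have hpf : prA (fun i => vals.getD i 0) t = false := by simpa using hp
      refine ⟨ihlen, ?_⟩
      intro j hj
      rw [ihpt j hj, partA_succ, hpf]
      by_cases hjt : t < j <;> simp [hjt]

-- named pieces of port B
def bInit (limit : Int) : List Bool :=
  PySem.List.pySetD
    (PySem.List.pySetD ((PySem.List.pyRange 0 (limit + 1) 1).map (fun _ => true)) 0 false) 1 false

def bStep (limit : Int) (fl : List Bool) (p : Int) : List Bool :=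
  if PySem.List.pyGetD fl p false then
    (PySem.List.pyRange (p + p) (limit + 1) p).foldl
      (fun fl2 m => PySem.List.pySetD fl2 m false) fl
  else fl

def bSieve (limit t : Int) : List Bool :=
  (PySem.List.pyRange 2 t 1).foldl (bStep limit) (bInit limit)

theorem B_eq_small (number : Int) (h2 : ¬ 2 ≤ PySem.Int.floordiv number 2) :
    all_prime_dividers_alt number = [number] := by
  simp only [all_prime_dividers_alt]
  rw [if_neg h2]
  simp

theorem B_eq_big (number : Int) (h2 : 2 ≤ PySem.Int.floordiv number 2) :
    all_prime_dividers_alt number =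
      (if ((PySem.List.pyRange 2 (PySem.Int.floordiv number 2 + 1) 1).filter
            (fun k => PySem.List.pyGetD
              (bSieve (PySem.Int.floordiv number 2) (PySem.Int.floordiv number 2 + 1)) k false)).all
            (fun p => decide (PySem.Int.mod number p ≠ 0))
       then ((PySem.List.pyRange 2 (PySem.Int.floordiv number 2 + 1) 1).filter
            (fun k => PySem.List.pyGetD
              (bSieve (PySem.Int.floordiv number 2) (PySem.Int.floordiv number 2 + 1)) k false))
            ++ [number]
       else ((PySem.List.pyRange 2 (PySem.Int.floordiv number 2 + 1) 1).filter
            (fun k => PySem.List.pyGetD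
              (bSieve (PySem.Int.floordiv number 2) (PySem.Int.floordiv number 2 + 1)) k false))) := by
  simp only [all_prime_dividers_alt]
  rw [if_pos h2]
  rfl

def partB (x t : Nat) : Bool :=
  decide (2 ≤ x) && (List.range t).all (fun p => !(prB p && decide (p ∣ x ∧ 2 * p ≤ x)))

theorem partB_ge {x t : Nat} (h : x ≤ t) : partB x t = prB x := by
  by_cases h2 : 2 ≤ x
  · apply pv_bool_ext
    rw [prB_iff, partB]
    simp [List.all_eq_true, List.mem_range]
    intro _
    constructor
    · intro hh p hp hbp hd
      rcases hh p (by omega) with h' | h' | h'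
      · rw [hbp] at h'; cases h'
      · exact absurd hd h'
      · exact h'
    · intro hh p hp
      by_cases hb : prB p = true
      · by_cases hd : p ∣ x
        · by_cases hpx : p < x
          · exact Or.inr (Or.inr (hh p hpx hb hd))
          · -- x ≤ p < t and p ∣ x with 2 ≤ x forces p = x is impossible with 2p ≤ x
            right; right
            have hx0 : 0 < x := by omega
            have hle : p ≤ x := Nat.le_of_dvd hx0 hd
            have : p = x := by omega
            omega
        · exact Or.inr (Or.inl hd)
      · exact Or.inl (by simpa using hb)
  · have hx : prB x = false := prB_of_lt_two (by omega)
    rw [partB, hx]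
    simp [show ¬ (2 ≤ x) from h2]

theorem partB_succ (x t : Nat) :
    partB x (t + 1) = (partB x t && !(prB t && decide (t ∣ x ∧ 2 * t ≤ x))) := by
  rw [partB, partB, List.range_succ, List.all_append, List.all_cons, List.all_nil,
    Bool.and_true, ← Bool.and_assoc]

theorem bSieve_char (limit : Int) (h2 : 2 ≤ limit) :
    ∀ u : Nat, (2 : Int) + u ≤ limit + 1 →
      (bSieve limit (2 + (u : Int))).length = (limit + 1).toNat ∧
      ∀ x : Nat, (x : Int) ≤ limit →
        (bSieve limit (2 + (u : Int))).getD x false = partB x (2 + u) := by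
  have hb0 : (bInit limit) = ((((PySem.List.pyRange 0 (limit + 1) 1).map
      (fun _ => true)).set 0 false).set 1 false) := by
    unfold bInit
    rw [PySem.List.pySetD_of_nonneg _ _ (by omega : (0:Int) ≤ 1),
      PySem.List.pySetD_of_nonneg _ _ (by omega : (0:Int) ≤ 0)]
    rfl
  have hblen : (bInit limit).length = (limit + 1).toNat := by
    rw [hb0, List.length_set, List.length_set, List.length_map,
      PySem.List.length_pyRange_one]
    omega
  have hbget : ∀ x : Nat, (x : Int) ≤ limit → (bInit limit).getD x false = decide (2 ≤ x) := by
    intro x hx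
    have hxl : x < ((PySem.List.pyRange 0 (limit + 1) 1).map (fun _ => true)).length := by
      rw [List.length_map, PySem.List.length_pyRange_one]; omega
    rw [hb0, pv_getD_set_false, pv_getD_set_false,
      List.getD_eq_getElem?_getD, List.getElem?_eq_getElem hxl]
    simp only [List.getElem_map]
    by_cases h0 : x = 0
    · simp [h0]
    · by_cases h1 : x = 1
      · simp [h1]
      · simp [h0, h1, show 2 ≤ x by omega]
  intro u
  induction u with
  | zero =>
    intro _
    unfold bSieve
    rw [show (2 : Int) + ((0 : Nat) : Int) = 2 by norm_num, PySem.List.pyRange_one_eq_nil le_rfl]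
    simp only [List.foldl_nil]
    refine ⟨hblen, ?_⟩
    intro x hx
    rw [hbget x hx]
    simp [partB, List.range_succ, prB_zero, prB_one]
  | succ u ihu =>
    intro hu
    obtain ⟨ihlen, ihpt⟩ := ihu (by omega)
    have hstep : bSieve limit (2 + ((u + 1 : Nat) : Int))
        = bStep limit (bSieve limit (2 + (u : Int))) (2 + (u : Int)) := by
      unfold bSieve
      rw [show (2 : Int) + ((u + 1 : Nat) : Int) = (2 + (u : Int)) + 1 by push_cast; ring,
        PySem.List.pyRange_one_succ_right (by omega : (2 : Int) ≤ 2 + (u : Int)),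
        List.foldl_append, List.foldl_cons, List.foldl_nil]
    have hcast : ((2 + u : Nat) : Int) = 2 + (u : Int) := by push_cast; ring
    have hread : PySem.List.pyGetD (bSieve limit (2 + (u : Int))) (2 + (u : Int)) false
        = prB (2 + u) := by
      rw [← hcast, PySem.List.pyGetD_natCast, hcast, ihpt (2 + u) (by omega), partB_ge le_rfl]
    rw [hstep]
    unfold bStep
    rw [hread]
    rw [show 2 + (u + 1) = (2 + u) + 1 from rfl]
    by_cases hp : prB (2 + u) = true
    · rw [if_pos hp]
      have hqpos : (0 : Int) < 2 + (u : Int) := by omega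
      have hnn : ∀ m ∈ PySem.List.pyRange ((2 + (u : Int)) + (2 + (u : Int))) (limit + 1)
          (2 + (u : Int)), 0 ≤ m := by
        intro m hm
        have := (PySem.List.mem_pyRange_iff_of_pos hqpos m).mp hm
        omega
      obtain ⟨flen, fpt⟩ := pv_foldB_inner _ (bSieve limit (2 + (u : Int))) hnn
      refine ⟨by rw [flen, ihlen], ?_⟩
      intro x hx
      rw [fpt x, partB_succ, hp]
      have hmem : ((x : Int)) ∈ PySem.List.pyRange ((2 + (u : Int)) + (2 + (u : Int)))
          (limit + 1) (2 + (u : Int)) ↔ ((2 + u) ∣ x ∧ 2 * (2 + u) ≤ x) := by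
        rw [PySem.List.mem_pyRange_iff_of_pos hqpos]
        constructor
        · rintro ⟨hge, _, hdvd⟩
          have hdx : (2 + (u : Int)) ∣ (x : Int) := by
            have h2 : (2 + (u : Int)) ∣ (2 + (u : Int)) + (2 + (u : Int)) := ⟨2, by ring⟩
            have := dvd_add hdvd h2
            simpa using this
          rw [← hcast] at hdx
          exact ⟨Int.natCast_dvd_natCast.mp hdx, by omega⟩
        · rintro ⟨hdvd, hge⟩
          have hdx : (2 + (u : Int)) ∣ (x : Int) := by
            rw [← hcast]
            exact_mod_cast hdvd
          refine ⟨by omega, by omega, dvd_sub hdx ⟨2, by ring⟩⟩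
      by_cases hc : (2 + u) ∣ x ∧ 2 * (2 + u) ≤ x
      · rw [if_pos (hmem.mpr hc)]
        simp [hc]
      · rw [if_neg (fun hmm => hc (hmem.mp hmm)), ihpt x hx]
        simp [hc]
    · rw [if_neg hp]
      have hpf : prB (2 + u) = false := by simpa using hp
      refine ⟨ihlen, ?_⟩
      intro x hx
      rw [ihpt x hx, partB_succ, hpf]
      simp

-- bridge between the two survival predicates
theorem pv_bridge (v : Nat → Int) (M : Nat) (hv : ∀ i, i < M → v i = 2 + (i : Int)) :
    ∀ j, j < M → prA v j = prB (j + 2) := by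
  intro j
  induction j using Nat.strong_induction_on with
  | _ j IH =>
  intro hj
  apply pv_bool_ext
  rw [prA_iff, prB_iff]
  constructor
  · intro h
    refine ⟨by omega, ?_⟩
    rintro p hp ⟨hbp, hdvd, h2p⟩
    have hp2 : 2 ≤ p := ((prB_iff p).mp hbp).1
    have hiM : p - 2 < j := by omega
    have hpa : prA v (p - 2) = true := by
      rw [IH (p - 2) hiM (by omega), show p - 2 + 2 = p by omega]
      exact hbp
    have hmod := h (p - 2) hiM hpa
    rw [hv (p - 2) (by omega), hv j hj] at hmod
    have hc1 : (2 : Int) + ((p - 2 : Nat) : Int) = (p : Int) := by push_cast [hp2]; ring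
    have hc2 : (2 : Int) + (j : Int) = ((j + 2 : Nat) : Int) := by push_cast; ring
    have hdvdZ : ((p : Int)) ∣ ((j + 2 : Nat) : Int) := Int.natCast_dvd_natCast.mpr hdvd
    rw [hc1, hc2, (PySem.Int.mod_eq_zero_iff_dvd _ _).mpr hdvdZ] at hmod
    omega
  · rintro ⟨h2, h⟩ i hi hpa
    have hbp : prB (i + 2) = true := by rw [← IH i hi (by omega)]; exact hpa
    rw [hv i (by omega), hv j hj]
    have hpos : (0 : Int) < 2 + (i : Int) := by omega
    have hnn := PySem.Int.mod_nonneg (2 + (j : Int)) hpos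
    rcases hnn.lt_or_eq with hlt | heq
    · exact hlt
    · exfalso
      have hdvdZ : ((2 : Int) + (i : Int)) ∣ (2 + (j : Int)) :=
        (PySem.Int.mod_eq_zero_iff_dvd _ _).mp heq.symm
      have hdvdN : (i + 2) ∣ (j + 2) := by
        have hZ : ((i + 2 : Nat) : Int) ∣ ((j + 2 : Nat) : Int) := by
          push_cast
          simpa [add_comm] using hdvdZ
        exact_mod_cast hZ
      exact h (i + 2) (by omega) ⟨hbp, hdvdN, two_mul_le_of_dvd hdvdN (by omega)⟩

-- ===== VERDICT (by name: the statement is the Claim_ definition above) =====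
theorem pv_main (number : Int) :
    all_prime_dividers number = all_prime_dividers_alt number := by
  by_cases h2 : 2 ≤ PySem.Int.floordiv number 2
  · -- main case: limit = number // 2 >= 2
    have hMI : (((((PySem.Int.floordiv number 2) - 1).toNat : Nat)) : Int) = (PySem.Int.floordiv number 2) - 1 := by omega
    have hvlen : (aVals number).length = ((PySem.Int.floordiv number 2) - 1).toNat + 1 := by
      unfold aVals
      rw [List.length_append, PySem.List.length_pyRange_one]
      simp
      omega
    have hvi : ∀ i, i < ((PySem.Int.floordiv number 2) - 1).toNat → (aVals number).getD i 0 = 2 + (i : Int) := by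
      intro i hi
      unfold aVals
      have hlenr : i < (PySem.List.pyRange 2 ((PySem.Int.floordiv number 2) + 1) 1).length := by
        rw [PySem.List.length_pyRange_one]; omega
      rw [List.getD_eq_getElem?_getD, List.getElem?_append_left hlenr,
        List.getElem?_eq_getElem hlenr, PySem.List.getElem_pyRange_one]
      rfl
    have hvM : (aVals number).getD (((PySem.Int.floordiv number 2) - 1).toNat) 0 = number := by
      unfold aVals
      have hge : (PySem.List.pyRange 2 ((PySem.Int.floordiv number 2) + 1) 1).length ≤ ((PySem.Int.floordiv number 2) - 1).toNat := by
        rw [PySem.List.length_pyRange_one]; omega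
      rw [List.getD_eq_getElem?_getD, List.getElem?_append_right hge]
      have hz : ((PySem.Int.floordiv number 2) - 1).toNat - (PySem.List.pyRange 2 ((PySem.Int.floordiv number 2) + 1) 1).length = 0 := by
        rw [PySem.List.length_pyRange_one]; omega
      rw [hz]
      rfl
    obtain ⟨slen, spt⟩ := aSieve_char (aVals number) (aVals number).length le_rfl
    have hfin : ∀ j, j < ((PySem.Int.floordiv number 2) - 1).toNat + 1 →
        (aSieve (aVals number) ((aVals number).length : Int)).getD j false
          = prA (fun i => (aVals number).getD i 0) j := by
      intro j hj
      rw [spt j (by omega), partA_ge _ (by omega)]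
    have hA : all_prime_dividers number =
        ((List.range (((PySem.Int.floordiv number 2) - 1).toNat)).filter (fun k => prB (k + 2))).map
            (fun k : Nat => 2 + (k : Int))
          ++ (if prA (fun i => (aVals number).getD i 0) (((PySem.Int.floordiv number 2) - 1).toNat) then [number]
              else []) := by
      rw [A_eq, slen, hvlen]
      rw [hvlen] at hfin
      rw [PySem.List.pyRange_zero_nat (((PySem.Int.floordiv number 2) - 1).toNat + 1), List.filter_map, List.map_map]
      have hpred : ∀ x ∈ List.range (((PySem.Int.floordiv number 2) - 1).toNat + 1),
          ((fun i => PySem.List.pyGetD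
              (aSieve (aVals number) (((((PySem.Int.floordiv number 2) - 1).toNat + 1 : Nat)) : Int)) i false) ∘
            (fun k : Nat => (k : Int))) x
            = (fun k => prA (fun i => (aVals number).getD i 0) k) x := by
        intro x hx
        simp only [Function.comp]
        rw [PySem.List.pyGetD_natCast]
        exact hfin x (List.mem_range.mp hx)
      rw [List.filter_congr hpred]
      have hmapf : ∀ x ∈ (List.range (((PySem.Int.floordiv number 2) - 1).toNat + 1)).filter
          (fun k => prA (fun i => (aVals number).getD i 0) k),
          ((fun i => PySem.List.pyGetD (aVals number) i 0 *
              (if PySem.List.pyGetD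
                  (aSieve (aVals number) (((((PySem.Int.floordiv number 2) - 1).toNat + 1 : Nat)) : Int)) i false
               then 1 else 0)) ∘ (fun k : Nat => (k : Int))) x
            = (aVals number).getD x 0 := by
        intro x hx
        obtain ⟨hxr, hxp⟩ := List.mem_filter.mp hx
        simp only [Function.comp]
        rw [PySem.List.pyGetD_natCast, PySem.List.pyGetD_natCast,
          hfin x (List.mem_range.mp hxr), hxp]
        simp
      rw [List.map_congr_left hmapf]
      rw [List.range_succ, List.filter_append, List.map_append]
      congr 1
      · have hf1 : ∀ x ∈ List.range (((PySem.Int.floordiv number 2) - 1).toNat),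
            (fun k => prA (fun i => (aVals number).getD i 0) k) x
              = (fun k => prB (k + 2)) x := by
          intro x hx
          exact pv_bridge _ _ hvi x (List.mem_range.mp hx)
        rw [List.filter_congr hf1]
        exact List.map_congr_left
          (fun x hx => hvi x (List.mem_range.mp (List.mem_filter.mp hx).1))
      · rw [List.filter_cons, List.filter_nil]
        cases h : prA (fun i => (aVals number).getD i 0) (((PySem.Int.floordiv number 2) - 1).toNat)
        · rfl
        · rw [if_pos rfl, if_pos rfl, List.map_cons, List.map_nil, hvM]
    obtain ⟨blen, bpt⟩ := bSieve_char ((PySem.Int.floordiv number 2)) h2 (((PySem.Int.floordiv number 2) - 1).toNat) (by omega)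
    rw [show (2 : Int) + ((((PySem.Int.floordiv number 2) - 1).toNat : Nat) : Int) = (PySem.Int.floordiv number 2) + 1 by omega] at bpt
    have hflag : ∀ x : Nat, (x : Int) ≤ (PySem.Int.floordiv number 2) →
        (bSieve ((PySem.Int.floordiv number 2)) ((PySem.Int.floordiv number 2) + 1)).getD x false = prB x := by
      intro x hx
      rw [bpt x hx, partB_ge (by omega : x ≤ 2 + ((PySem.Int.floordiv number 2) - 1).toNat)]
    rw [hA, B_eq_big number h2]
    have hP : (PySem.List.pyRange 2 ((PySem.Int.floordiv number 2) + 1) 1).filter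
          (fun k => PySem.List.pyGetD (bSieve ((PySem.Int.floordiv number 2)) ((PySem.Int.floordiv number 2) + 1)) k false)
        = ((List.range (((PySem.Int.floordiv number 2) - 1).toNat)).filter (fun k => prB (k + 2))).map
            (fun k : Nat => 2 + (k : Int)) := by
      rw [PySem.List.pyRange_one 2 ((PySem.Int.floordiv number 2) + 1), show ((PySem.Int.floordiv number 2) + 1 - 2).toNat = ((PySem.Int.floordiv number 2) - 1).toNat by omega,
        List.filter_map]
      have hpred : ∀ x ∈ List.range (((PySem.Int.floordiv number 2) - 1).toNat),
          ((fun k => PySem.List.pyGetD (bSieve ((PySem.Int.floordiv number 2)) ((PySem.Int.floordiv number 2) + 1)) k false) ∘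
            (fun k : Nat => 2 + (k : Int))) x = (fun k => prB (k + 2)) x := by
        intro x hx
        have hx' : x < ((PySem.Int.floordiv number 2) - 1).toNat := List.mem_range.mp hx
        simp only [Function.comp]
        rw [show (2 : Int) + (x : Int) = (((x + 2 : Nat)) : Int) by push_cast; ring,
          PySem.List.pyGetD_natCast, hflag (x + 2) (by omega)]
      rw [List.filter_congr hpred]
    rw [hP]
    have hall : ((((List.range (((PySem.Int.floordiv number 2) - 1).toNat)).filter (fun k => prB (k + 2))).map
          (fun k : Nat => 2 + (k : Int))).all (fun p => decide (PySem.Int.mod number p ≠ 0)))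
        = prA (fun i => (aVals number).getD i 0) (((PySem.Int.floordiv number 2) - 1).toNat) := by
      apply pv_bool_ext
      rw [List.all_map, List.all_eq_true, prA_iff]
      constructor
      · intro h i hi hpa
        have hb : prB (i + 2) = true := by
          rw [← pv_bridge _ _ hvi i hi]; exact hpa
        have hmem : i ∈ (List.range (((PySem.Int.floordiv number 2) - 1).toNat)).filter (fun k => prB (k + 2)) :=
          List.mem_filter.mpr ⟨List.mem_range.mpr hi, hb⟩
        have hne := h i hmem
        simp only [Function.comp, decide_eq_true_eq] at hne
        rw [hvi i hi, hvM]
        have hpos : (0 : Int) < 2 + (i : Int) := by omega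
        rcases (PySem.Int.mod_nonneg number hpos).lt_or_eq with hlt | heq
        · exact hlt
        · exact absurd heq.symm hne
      · intro h x hx
        obtain ⟨hxr, hxp⟩ := List.mem_filter.mp hx
        have hxM : x < ((PySem.Int.floordiv number 2) - 1).toNat := List.mem_range.mp hxr
        simp only [Function.comp, decide_eq_true_eq]
        have hpa : prA (fun i => (aVals number).getD i 0) x = true := by
          rw [pv_bridge _ _ hvi x hxM]; exact hxp
        have hgt := h x hxM hpa
        rw [hvi x hxM, hvM] at hgt
        omega
    rw [hall]
    cases hpM : prA (fun i => (aVals number).getD i 0) (((PySem.Int.floordiv number 2) - 1).toNat) <;> simp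
  · have hv : aVals number = [number] := by
      unfold aVals
      rw [PySem.List.pyRange_one_eq_nil (by omega)]
      rfl
    have h1 : aSieve [number] (([number] : List Int).length : Int) = [true] := by
      simp [aSieve, aStep, PySem.List.pyRange]
    rw [A_eq, hv, h1, B_eq_small number h2]
    simp [PySem.List.pyRange, PySem.List.pyGetD]

theorem all_prime_dividers_spec : Claim_equal_all_prime_dividers := by
  intro number _
  exact pv_main number
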